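-- pv_equiv track=rewrite | github.com/seanbetts/sidebar | backend/workers/ingestion_worker.py | _normalize_table_rows
-- ===== SOURCE A (Python) =====
-- def _normalize_table_rows(rows: list[list[object | None]]) -> list[list[str]]:
--     if not rows:
--         return []
--     max_cols = max(len(row) for row in rows)
--     normalized = []
--     for row in rows:
--         padded = [str(cell).strip() if cell is not None else "" for cell in row]
--         padded += [""] * (max_cols - len(padded))
--         normalized.append(padded)
--     last_col = -1
--     for col in range(max_cols):
--         if any(row[col].strip() for row in normalized):
--             last_col = col
--     if last_col < 0:
--         return []
--     trimmed = [row[: last_col + 1] for row in normalized]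
--     return [row for row in trimmed if any(cell.strip() for cell in row)]
-- ===== SOURCE B (Python) =====
-- def _normalize_table_rows(rows: list[list[object | None]]) -> list[list[str]]:
--     # Right-strip each row of trailing empty cells (reverse traversal with an
--     # accumulator); the table width is the longest stripped row; re-pad the
--     # surviving non-empty rows to that width.  No padding to max_cols, no
--     # column-major scan, no slicing.
--     def rstrip_norm(row):
--         out = []
--         for cell in reversed(row):
--             text = str(cell).strip() if cell is not None else ""
--             if text or out:
--                 out.append(text)
--         out.reverse()
--         return out
--
--     core = [rstrip_norm(row) for row in rows]
--     width = max((len(r) for r in core), default=0)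
--     if width == 0:
--         return []
--     return [r + [""] * (width - len(r)) for r in core if r]
-- ===== Notes on version B (the rewrite author's own statement) =====
-- stated objective: alternative
-- what changed: A pads every row to max_cols, finds the last non-empty column with a column-major any() scan per column, slices every row to it and filters; B never pads to max_cols or scans columns: it right-strips each normalized row of its trailing empty cells in a reverse traversal, takes the longest stripped row as the table width, and re-pads the surviving non-empty rows to that width.
import Mathlib
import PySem

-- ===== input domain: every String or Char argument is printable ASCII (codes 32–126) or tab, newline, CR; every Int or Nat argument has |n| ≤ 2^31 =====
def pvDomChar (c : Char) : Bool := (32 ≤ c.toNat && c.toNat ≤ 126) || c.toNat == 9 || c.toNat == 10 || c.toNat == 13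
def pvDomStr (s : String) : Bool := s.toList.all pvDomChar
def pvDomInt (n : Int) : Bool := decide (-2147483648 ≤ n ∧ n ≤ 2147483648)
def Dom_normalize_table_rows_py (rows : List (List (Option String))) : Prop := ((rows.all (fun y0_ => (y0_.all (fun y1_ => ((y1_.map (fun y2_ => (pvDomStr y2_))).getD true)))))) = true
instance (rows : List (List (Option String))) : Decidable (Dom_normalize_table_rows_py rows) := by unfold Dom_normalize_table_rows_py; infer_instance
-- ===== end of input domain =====

-- B drops A's pad-to-max_cols / column-major scan / slice pipeline: it right-strips each
-- normalized row of its trailing empty cells (reverse traversal), takes the longest stripped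
-- row as the width, and re-pads the surviving non-empty rows (objective: alternative
-- decomposition; same return value on every input).

-- shared cell normalizer: `str(cell).strip() if cell is not None else ""` (cell is already a str in our typing)
def pvCell (cell : Option String) : String :=
  match cell with
  | some s => PySem.Str.strip s
  | none => ""

-- ===== PORT A =====
def normalize_table_rows_py (rows : List (List (Option String))) : List (List String) :=
  if rows = [] then []
  else
    -- max(len(row) for row in rows); rows ≠ [] so max? is some and getD's default is unreachable
    let max_cols : Nat := (PySem.List.max? (rows.map (fun row => row.length)) (fun n => n)).getD 0
    let normalized : List (List String) :=
      rows.foldl (fun acc row =>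
        acc ++ [row.map pvCell ++ List.replicate (max_cols - row.length) ""]) []
    let last_col : Int :=
      (PySem.List.pyRange 0 (max_cols : Int) 1).foldl (fun last col =>
        -- row[col] is always in range (every normalized row has length max_cols), so pyGetD is exact
        if normalized.any (fun row => PySem.Str.strip (PySem.List.pyGetD row col "") != "") then col
        else last) (-1)
    if last_col < 0 then []
    else
      let trimmed := normalized.map (fun row => PySem.List.slice row none (some (last_col + 1)))
      trimmed.filter (fun row => row.any (fun cell => PySem.Str.strip cell != ""))

-- ===== PORT B =====
-- reverse loop with accumulator `out`, appended then reversed, exactly as in Source B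
def pvRstripNorm (row : List (Option String)) : List String :=
  (row.reverse.foldl (fun out cell =>
      if pvCell cell != "" || out != [] then out ++ [pvCell cell] else out) []).reverse

def normalize_table_rows_py_alt (rows : List (List (Option String))) : List (List String) :=
  let core := rows.map pvRstripNorm
  let width : Nat := (PySem.List.max? (core.map (fun r => r.length)) (fun n => n)).getD 0
  if width = 0 then []
  else (core.filter (fun r => r != [])).map (fun r => r ++ List.replicate (width - r.length) "")

-- ===== PRECONDITION & SPEC =====
def Spec_normalize_table_rows_py (rows : List (List (Option String))) (out : List (List String)) : Prop := out = normalize_table_rows_py_alt rows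
instance (rows : List (List (Option String))) (out : List (List String)) : Decidable (Spec_normalize_table_rows_py rows out) := by unfold Spec_normalize_table_rows_py; infer_instance

-- ===== CLAIM (what is proved, stated in full; the proofs are below) =====
def Claim_equal_normalize_table_rows_py : Prop := ∀ (rows : List (List (Option String))), Dom_normalize_table_rows_py rows → Spec_normalize_table_rows_py rows (normalize_table_rows_py rows)

-- ===== LEMMAS AND PROOFS =====

-- strip is idempotent
theorem pvDropWhile_prefix {p : Char → Bool} {l z : List Char} (h : l.dropWhile p = l)
    (hz : z <+: l) : z.dropWhile p = z := by
  rw [List.dropWhile_eq_self_iff] at h ⊢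
  intro hl
  have hlen : 0 < l.length := lt_of_lt_of_le hl hz.length_le
  have h0 := hz.getElem (i := 0) hl
  rw [h0]
  exact h hlen

theorem pvChars_strip_strip (s : List Char) :
    PySem.Chars.strip (PySem.Chars.strip s) = PySem.Chars.strip s := by
  unfold PySem.Chars.strip PySem.Chars.rstrip PySem.Chars.lstrip
  set p := PySem.Chars.isspace with hp
  set y := List.dropWhile p s with hy
  have hyd : y.dropWhile p = y := by rw [hy]; exact List.dropWhile_idempotent p s
  have hpref : (List.dropWhile p y.reverse).reverse <+: y := by
    have h1 : List.dropWhile p y.reverse <:+ y.reverse := List.dropWhile_suffix p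
    have h2 := List.reverse_prefix.mpr h1
    rwa [List.reverse_reverse] at h2
  rw [pvDropWhile_prefix hyd hpref, List.reverse_reverse, List.dropWhile_idempotent]

theorem pvStr_strip_strip (s : String) : PySem.Str.strip (PySem.Str.strip s) = PySem.Str.strip s := by
  unfold PySem.Str.strip
  rw [String.toList_ofList, pvChars_strip_strip]

theorem pvStrip_cell (c : Option String) : PySem.Str.strip (pvCell c) = pvCell c := by
  cases c with
  | none => decide
  | some s => exact pvStr_strip_strip s

-- A's append loop builds a map
theorem pvFoldlAppend {α β : Type} (l : List α) (f : α → β) (init : List β) :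
    l.foldl (fun a x => a ++ [f x]) init = init ++ l.map f := by
  induction l generalizing init with
  | nil => simp
  | cons x xs ih => simp [List.foldl_cons, ih]

-- A's range loop computes pvGlast
def pvGlast (p : Int → Bool) : Nat → Int
  | 0 => -1
  | (m+1) => if p m then m else pvGlast p m

theorem pvFoldRange (p : Int → Bool) (M : Nat) :
    (PySem.List.pyRange 0 (M : Int) 1).foldl (fun last col => if p col then col else last) (-1)
      = pvGlast p M := by
  rw [PySem.List.pyRange_one]
  simp only [Int.sub_zero, Int.toNat_natCast, List.foldl_map, Int.zero_add]
  induction M with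
  | zero => rfl
  | succ m ih => rw [List.range_succ]; simp only [List.foldl_append, List.foldl_cons,
      List.foldl_nil, ih, pvGlast]

theorem pvGlast_ub (p : Int → Bool) (M : Nat) :
    ∀ k : Nat, k < M → p k = true → (k : Int) ≤ pvGlast p M := by
  induction M with
  | zero => intro k hk _; omega
  | succ m ih =>
      intro k hk hp
      simp only [pvGlast]
      split
      · exact_mod_cast Nat.le_of_lt_succ hk
      · rename_i hpm
        have hkm : k ≠ m := by intro h; rw [h] at hp; exact hpm hp
        exact ih k (by omega) hp

theorem pvGlast_cases (p : Int → Bool) (M : Nat) :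
    pvGlast p M = -1 ∨ ∃ n : Nat, n < M ∧ pvGlast p M = (n : Int) ∧ p n = true := by
  induction M with
  | zero => left; rfl
  | succ m ih =>
      simp only [pvGlast]
      split
      · right; exact ⟨m, by omega, rfl, by assumption⟩
      · rcases ih with h | ⟨n, hn, he, hp⟩
        · left; exact h
        · right; exact ⟨n, by omega, he, hp⟩

-- recursive characterization of B's reverse loop
def pvRstripR : List (Option String) → List String
  | [] => []
  | c :: cs =>
      let t := pvRstripR cs
      if pvCell c != "" || t != [] then pvCell c :: t else t

theorem pvRstripNorm_eq (row : List (Option String)) : pvRstripNorm row = pvRstripR row := by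
  induction row with
  | nil => rfl
  | cons c cs ih =>
      unfold pvRstripNorm at ih ⊢
      rw [List.reverse_cons, List.foldl_append, List.foldl_cons, List.foldl_nil]
      simp only [pvRstripR]
      rw [← ih]
      set o := cs.reverse.foldl (fun out cell =>
        if pvCell cell != "" || out != [] then out ++ [pvCell cell] else out) [] with ho
      have hne : (o != []) = (o.reverse != []) := by
        rw [Bool.eq_iff_iff]
        simp
      rw [← hne]
      split
      · rw [List.reverse_append]; rfl
      · rfl

-- the normalized row is the stripped row plus trailing empties
theorem pvRstrip_decomp (row : List (Option String)) :
    ∃ k, row.map pvCell = pvRstripR row ++ List.replicate k "" := by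
  induction row with
  | nil => exact ⟨0, rfl⟩
  | cons c cs ih =>
      obtain ⟨k, hk⟩ := ih
      simp only [pvRstripR]
      by_cases h : pvCell c != "" || pvRstripR cs != []
      · rw [if_pos h]
        exact ⟨k, by simp [hk]⟩
      · rw [if_neg h]
        simp only [bne_iff_ne, ne_eq, Bool.or_eq_true, not_or, not_not] at h
        obtain ⟨hc, ht⟩ := h
        refine ⟨k + 1, ?_⟩
        rw [List.map_cons, hk, ht, hc]
        simp [List.replicate_succ]

-- the last cell of a non-empty stripped row is non-empty
theorem pvRstrip_last (row : List (Option String)) :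
    ∀ x, (pvRstripR row).getLast? = some x → x ≠ "" := by
  induction row with
  | nil => intro x hx; simp [pvRstripR] at hx
  | cons c cs ih =>
      simp only [pvRstripR]
      by_cases hcond : pvCell c != "" || pvRstripR cs != []
      · rw [if_pos hcond]
        cases hcs : pvRstripR cs with
        | nil =>
            intro x hx
            rw [hcs] at hcond
            simp only [List.getLast?_singleton, Option.some.injEq] at hx
            subst hx
            simpa using hcond
        | cons y ys =>
            intro x hx
            rw [List.getLast?_cons_cons] at hx
            rw [hcs] at ih
            exact ih x hx
      · rw [if_neg hcond]
        exact ih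

-- filtering a mapped list is mapping a filtered list, up to pointwise agreement
theorem pvMapFilter {α β : Type} (l : List α) (f g : α → β) (p : β → Bool) (q : α → Bool)
    (hf : ∀ x ∈ l, f x = g x) (hp : ∀ x ∈ l, p (f x) = q x) :
    (l.map f).filter p = (l.filter q).map g := by
  induction l with
  | nil => rfl
  | cons x xs ih =>
      have hf' := fun y hy => hf y (List.mem_cons_of_mem _ hy)
      have hp' := fun y hy => hp y (List.mem_cons_of_mem _ hy)
      have hfx : f x = g x := hf x (by simp)
      have hpx : p (g x) = q x := by rw [← hfx]; exact hp x (by simp)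
      simp only [List.map_cons, List.filter_cons, hfx, hpx]
      cases hq : q x <;> simp [ih hf' hp']

-- main equivalence on nonempty input
theorem pvMain (rows : List (List (Option String))) (hne : rows ≠ []) :
    normalize_table_rows_py rows = normalize_table_rows_py_alt rows := by
  simp only [normalize_table_rows_py, normalize_table_rows_py_alt]
  rw [if_neg hne]
  -- rewrite B's per-row loop into its recursive characterization
  have hcore : rows.map pvRstripNorm = rows.map pvRstripR :=
    List.map_congr_left (fun r _ => pvRstripNorm_eq r)
  rw [hcore]
  set M : Nat := (PySem.List.max? (rows.map (fun row => row.length)) (fun n => n)).getD 0 with hM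
  have hlen : ∀ row ∈ rows, row.length ≤ M := by
    intro row hrow
    obtain ⟨m, hm⟩ : ∃ m, PySem.List.max? (rows.map (fun row => row.length)) (fun n => n) = some m := by
      cases hmx : PySem.List.max? (rows.map (fun row => row.length)) (fun n => n) with
      | none =>
          exfalso
          exact hne (by simpa using (PySem.List.max?_eq_none_iff _ _).mp hmx)
      | some m => exact ⟨m, rfl⟩
    have h1 := PySem.List.max?_isMax hm row.length (List.mem_map_of_mem hrow)
    rw [hM, hm]
    simpa using h1
  rw [pvFoldlAppend rows (fun row => row.map pvCell ++ List.replicate (M - row.length) "") []]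
  rw [List.nil_append]
  -- per-row facts
  have hdec : ∀ row : List (Option String), ∃ k,
      row.map pvCell = pvRstripR row ++ List.replicate k "" := pvRstrip_decomp
  have hslen : ∀ row : List (Option String), (pvRstripR row).length ≤ row.length := by
    intro row
    obtain ⟨k, hk⟩ := hdec row
    have := congrArg List.length hk
    simp at this
    omega
  have hsmem : ∀ row : List (Option String), ∀ c ∈ pvRstripR row, PySem.Str.strip c = c := by
    intro row c hc
    obtain ⟨k, hk⟩ := hdec row
    have : c ∈ row.map pvCell := by rw [hk]; exact List.mem_append_left _ hc
    obtain ⟨cell, _, rfl⟩ := List.mem_map.mp this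
    exact pvStrip_cell cell
  -- W = max stripped length
  obtain ⟨W, hWsome, hWmem, hWmax⟩ : ∃ W,
      PySem.List.max? ((rows.map pvRstripR).map (fun r => r.length)) (fun n => n) = some W ∧
      (∃ row ∈ rows, (pvRstripR row).length = W) ∧
      (∀ row ∈ rows, (pvRstripR row).length ≤ W) := by
    cases hmx : PySem.List.max? ((rows.map pvRstripR).map (fun r => r.length)) (fun n => n) with
    | none =>
        exfalso
        exact hne (by simpa using (PySem.List.max?_eq_none_iff _ _).mp hmx)
    | some w =>
        refine ⟨w, rfl, ?_, ?_⟩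
        · have := PySem.List.max?_mem hmx
          simp only [List.map_map, List.mem_map] at this
          obtain ⟨row, hrow, hw⟩ := this
          exact ⟨row, hrow, hw⟩
        · intro row hrow
          have := PySem.List.max?_isMax hmx ((pvRstripR row)).length
            (by simp only [List.map_map, List.mem_map]; exact ⟨row, hrow, rfl⟩)
          simpa using this
  rw [hWsome]
  simp only [Option.getD_some]
  -- A's column predicate, characterized
  set p : Int → Bool := fun col =>
    (rows.map (fun row => row.map pvCell ++ List.replicate (M - row.length) "")).any
      (fun row => PySem.Str.strip (PySem.List.pyGetD row col "") != "") with hp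
  have hPA : ∀ n : Nat, p ((n : Nat) : Int) = true ↔
      (∃ row ∈ rows, ∃ h : n < (row.map pvCell).length, (row.map pvCell)[n] ≠ "") := by
    intro n
    rw [hp, List.any_eq_true]
    constructor
    · rintro ⟨prow, hprow, hval⟩
      obtain ⟨row, hrN, rfl⟩ := List.mem_map.mp hprow
      simp only [bne_iff_ne, ne_eq] at hval
      rw [PySem.List.pyGetD_natCast] at hval
      by_cases hn : n < (row.map pvCell).length
      · refine ⟨row, hrN, hn, ?_⟩
        rw [List.getD_eq_getElem _ _ (by simp at hn ⊢; omega), List.getElem_append_left hn] at hval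
        intro h0
        exact hval (by rw [h0]; decide)
      · exfalso
        apply hval
        simp only [List.length_map] at hn
        by_cases hnM : n < M
        · rw [List.getD_eq_getElem _ _ (by simp [List.length_replicate]; omega)]
          rw [List.getElem_append_right (by simp; omega)]
          simp [List.getElem_replicate]
          decide
        · rw [List.getD_eq_default _ _ (by simp [List.length_replicate]; omega)]
          decide
    · rintro ⟨row, hrN, hn, hval⟩
      refine ⟨row.map pvCell ++ List.replicate (M - row.length) "", List.mem_map_of_mem hrN, ?_⟩
      simp only [bne_iff_ne, ne_eq]
      rw [PySem.List.pyGetD_natCast]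
      rw [List.getD_eq_getElem _ _ (by simp at hn ⊢; omega), List.getElem_append_left hn]
      have hmem : (row.map pvCell)[n] ∈ row.map pvCell := List.getElem_mem hn
      obtain ⟨cell, _, hc⟩ := List.mem_map.mp hmem
      rw [← hc, pvStrip_cell]
      rw [hc]
      exact hval
  -- nonempty cells sit inside the stripped row
  have hinside : ∀ row : List (Option String), ∀ n : Nat, ∀ h : n < (row.map pvCell).length,
      (row.map pvCell)[n] ≠ "" → n < (pvRstripR row).length := by
    intro row n h hval
    obtain ⟨k, hk⟩ := hdec row
    by_contra hge'
    have hge : (pvRstripR row).length ≤ n := Nat.le_of_not_lt hge'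
    apply hval
    have hlt : n - (pvRstripR row).length < k := by
      have := congrArg List.length hk
      simp at this h
      omega
    simp only [hk] at h ⊢
    rw [List.getElem_append_right hge]
    exact List.getElem_replicate _
  -- the last cell of a maximal stripped row is non-empty, at index W-1
  have hpGlast : pvGlast p M = (W : Int) - 1 := by
    rcases Nat.eq_zero_or_pos W with hW0 | hWpos
    · rcases pvGlast_cases p M with h | ⟨n, _, _, hpn⟩
      · rw [h, hW0]; rfl
      · exfalso
        obtain ⟨row, hrow, hn, hval⟩ := (hPA n).mp hpn
        have := hinside row n hn hval
        have := hWmax row hrow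
        omega
    · obtain ⟨row0, hrow0, hlen0⟩ := hWmem
      have hs0 : pvRstripR row0 ≠ [] := by
        intro h0; rw [h0] at hlen0; simp at hlen0; omega
      have hplast : p ((W - 1 : Nat) : Int) = true := by
        rw [hPA]
        obtain ⟨k, hk⟩ := hdec row0
        subst hlen0
        have hlky := congrArg List.length hk
        simp only [List.length_append, List.length_map, List.length_replicate] at hlky
        have hl1 : (pvRstripR row0).length - 1 < (row0.map pvCell).length := by
          simp only [List.length_map]; omega
        refine ⟨row0, hrow0, hl1, ?_⟩
        have hlt : (pvRstripR row0).length - 1 < (pvRstripR row0).length := by omega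
        have hgl : (pvRstripR row0).getLast? = some ((pvRstripR row0)[(pvRstripR row0).length - 1]) := by
          rw [List.getLast?_eq_getElem?, List.getElem?_eq_getElem hlt]
        have hx := pvRstrip_last row0 _ hgl
        simp only [hk] at hl1 ⊢
        rw [List.getElem_append_left hlt]
        exact hx
      have hub : (W : Int) - 1 ≤ pvGlast p M := by
        have hWM : W - 1 < M := by
          have h1 := hslen row0
          have h2 := hlen row0 hrow0
          omega
        have := pvGlast_ub p M (W - 1) hWM hplast
        omega
      rcases pvGlast_cases p M with h | ⟨n, _, he, hpn⟩
      · exfalso; rw [h] at hub; omega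
      · obtain ⟨row, hrow, hn, hval⟩ := (hPA n).mp hpn
        have h1 := hinside row n hn hval
        have h2 := hWmax row hrow
        rw [he]
        omega
  rw [pvFoldRange p M, hpGlast]
  by_cases hW0 : W = 0
  · rw [if_pos (by omega), if_pos hW0]
  · rw [if_neg (by omega), if_neg hW0]
    -- per-row: A's trimmed padded row equals B's re-padded stripped row
    have hWM : W ≤ M := by
      obtain ⟨row0, hrow0, hlen0⟩ := hWmem
      have h1 := hslen row0
      have h2 := hlen row0 hrow0
      omega
    have hW1 : ((W : Int) - 1 + 1) = (W : Int) := by ring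
    have hrowEq : ∀ row ∈ rows,
        PySem.List.slice (row.map pvCell ++ List.replicate (M - row.length) "") none (some ((W : Int) - 1 + 1))
          = pvRstripR row ++ List.replicate (W - (pvRstripR row).length) "" := by
      intro row hrow
      rw [hW1, PySem.List.slice_to _ (by omega), Int.toNat_natCast]
      obtain ⟨k, hk⟩ := hdec row
      have hklen : row.length = (pvRstripR row).length + k := by
        have := congrArg List.length hk; simpa using this
      have hpad : row.map pvCell ++ List.replicate (M - row.length) ""
          = pvRstripR row ++ List.replicate (M - (pvRstripR row).length) "" := by
        rw [hk, List.append_assoc, List.replicate_append_replicate]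
        congr 2
        have := hlen row hrow
        omega
      rw [hpad, List.take_append, List.take_of_length_le (by exact hWmax row hrow),
        List.take_replicate]
      congr 2
      have h2 := hWmax row hrow
      omega
    -- the kept-row conditions agree
    have hcond : ∀ row ∈ rows,
        ((pvRstripR row ++ List.replicate (W - (pvRstripR row).length) "").any
          (fun cell => PySem.Str.strip cell != ""))
          = (pvRstripR row != []) := by
      intro row hrow
      rw [Bool.eq_iff_iff, List.any_eq_true, bne_iff_ne]
      constructor
      · rintro ⟨c, hc, hsc⟩
        simp only [bne_iff_ne, ne_eq] at hsc
        rcases List.mem_append.mp hc with h | h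
        · intro h0; rw [h0] at h; simp at h
        · exfalso
          rw [List.eq_of_mem_replicate h] at hsc
          exact hsc (by decide)
      · intro hs
        obtain ⟨x, hgl⟩ : ∃ x, (pvRstripR row).getLast? = some x := by
          cases hx : (pvRstripR row).getLast? with
          | none => exact absurd (List.getLast?_eq_none_iff.mp hx) hs
          | some x => exact ⟨x, rfl⟩
        have hxmem : x ∈ pvRstripR row := List.mem_of_getLast? hgl
        refine ⟨x, List.mem_append_left _ hxmem, ?_⟩
        simp only [bne_iff_ne, ne_eq]
        rw [hsmem row _ hxmem]
        exact pvRstrip_last row _ hgl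
    -- assemble
    rw [List.map_map]
    simp only [Function.comp_def]
    rw [pvMapFilter rows _
      (fun row => pvRstripR row ++ List.replicate (W - (pvRstripR row).length) "") _
      (fun row => pvRstripR row != [])
      (fun row hrow => hrowEq row hrow)
      (fun row hrow => by
        rw [hrowEq row hrow]
        exact hcond row hrow)]
    rw [List.filter_map, List.map_map]
    rfl

-- ===== VERDICT (by name: the statement is the Claim_ definition above) =====
theorem normalize_table_rows_py_spec : Claim_equal_normalize_table_rows_py := by
  intro rows _
  unfold Spec_normalize_table_rows_py
  by_cases hne : rows = []
  · subst hne; decide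
  · exact pvMain rows hne
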